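-- pv_equiv track=rewrite | github.com/onooff/algorithm | programmers/p12941.py | solution
-- ===== SOURCE A (Python) =====
-- def solution(a, b):
--     answer = 0
--
--     a.sort()
--     b.sort()
--     go = len(a)
--     for i in range(go):
--         ab = a[0]*b[len(b)-1]
--         ba = b[0]*a[len(a)-1]
--         if ab > ba:
--             answer += ba
--             b.pop(0)
--             a.pop()
--         else:
--             answer += ab
--             a.pop(0)
--             b.pop()
--
--     return answer
-- ===== SOURCE B (Python) =====
-- def solution(a, b):
--     # Same greedy choice, but over immutable sorted copies with two counters and
--     # closed-form index arithmetic -- no in-place mutation, no O(n) pop(0) shifts.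
--     sa, sb = sorted(a), sorted(b)
--     n, m = len(sa), len(sb)
--     total = 0
--     i = 0  # pairs taken from a's top / b's bottom
--     j = 0  # pairs taken from a's bottom / b's top
--     while i + j < n:
--         ab = sa[j] * sb[m - 1 - j]
--         ba = sb[i] * sa[n - 1 - i]
--         if ab > ba:
--             total += ba
--             i += 1
--         else:
--             total += ab
--             j += 1
--     return total
-- ===== Notes on version B (the rewrite author's own statement) =====
-- stated objective: faster
-- what changed: Replaces A's destructive loop (in-place sort, end lookups and O(n) pop(0) shifts on shrinking lists) with index arithmetic over immutable sorted copies: two counters locate all four ends in O(1), so no list is ever mutated.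
import Mathlib
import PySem

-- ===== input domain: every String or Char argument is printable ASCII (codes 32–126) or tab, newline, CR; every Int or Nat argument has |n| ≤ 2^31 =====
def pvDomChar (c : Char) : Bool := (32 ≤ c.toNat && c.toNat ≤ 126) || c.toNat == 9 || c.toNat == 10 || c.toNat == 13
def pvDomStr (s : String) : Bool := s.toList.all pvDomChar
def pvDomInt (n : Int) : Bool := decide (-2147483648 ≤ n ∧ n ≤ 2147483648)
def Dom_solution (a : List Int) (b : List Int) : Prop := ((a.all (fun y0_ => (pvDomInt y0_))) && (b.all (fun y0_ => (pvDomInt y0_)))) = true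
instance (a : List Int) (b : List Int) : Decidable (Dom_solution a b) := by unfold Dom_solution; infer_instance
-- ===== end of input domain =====

-- B replaces A's in-place pops on shrinking lists with two counters and index arithmetic
-- over immutable sorted copies; return value only — A sorts/pops its arguments in place,
-- B does not mutate them.


-- ===== PORT A =====
-- one loop iteration: look up both ends, pick the smaller cross product, pop the used
-- elements; the .getD defaults are only reached where the Python raises IndexError
-- (outside Pre_solution).
def solutionStep (s : List Int × List Int × Int) : List Int × List Int × Int :=
  match s with
  | (a, b, answer) =>
    let ab := (PySem.List.pyGet? a 0).getD 0 * (PySem.List.pyGet? b ((b.length : Int) - 1)).getD 0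
    let ba := (PySem.List.pyGet? b 0).getD 0 * (PySem.List.pyGet? a ((a.length : Int) - 1)).getD 0
    if ab > ba then
      (((PySem.List.pop? a (-1)).getD (0, a)).2, ((PySem.List.pop? b 0).getD (0, b)).2, answer + ba)
    else
      (((PySem.List.pop? a 0).getD (0, a)).2, ((PySem.List.pop? b (-1)).getD (0, b)).2, answer + ab)

def solution (a : List Int) (b : List Int) : Int :=
  let a0 := PySem.List.sorted a (fun x => x) false
  let b0 := PySem.List.sorted b (fun x => x) false
  let go := a0.length
  ((List.range go).foldl (fun s _ => solutionStep s) (a0, b0, 0)).2.2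

-- ===== PORT B =====
-- the while loop 'while i + j < n'; fuel (= n at the start, enough for the at most
-- n - i - j remaining iterations) is only a termination device, the real loop condition
-- is the 'i + j < n' guard.
def solutionAltLoop (sa sb : List Int) (n m : ℕ) : ℕ → ℕ → ℕ → Int → Int
  | 0, _, _, total => total
  | fuel + 1, i, j, total =>
    if i + j < n then
      let ab := (PySem.List.pyGet? sa (j : Int)).getD 0 * (PySem.List.pyGet? sb ((m : Int) - 1 - (j : Int))).getD 0
      let ba := (PySem.List.pyGet? sb (i : Int)).getD 0 * (PySem.List.pyGet? sa ((n : Int) - 1 - (i : Int))).getD 0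
      if ab > ba then
        solutionAltLoop sa sb n m fuel (i + 1) j (total + ba)
      else
        solutionAltLoop sa sb n m fuel i (j + 1) (total + ab)
    else total

def solution_alt (a : List Int) (b : List Int) : Int :=
  let sa := PySem.List.sorted a (fun x => x) false
  let sb := PySem.List.sorted b (fun x => x) false
  solutionAltLoop sa sb sa.length sb.length sa.length 0 0 0

-- ===== PRECONDITION & SPEC =====
-- Pre_ excludes exactly the inputs with len(b) < len(a), on which A raises IndexError
-- (its loop pops b empty and then reads b[-1]).
def Pre_solution (a : List Int) (b : List Int) : Prop := a.length ≤ b.length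
instance (a : List Int) (b : List Int) : Decidable (Pre_solution a b) := by unfold Pre_solution; infer_instance
def pvWitness_solution : List Int × List Int := ([1, 2], [3, 4])

def Spec_solution (a : List Int) (b : List Int) (out : Int) : Prop := out = solution_alt a b
instance (a : List Int) (b : List Int) (out : Int) : Decidable (Spec_solution a b out) := by unfold Spec_solution; infer_instance

-- ===== CLAIM (what is proved, stated in full; the proofs are below) =====
def Claim_equal_solution : Prop := ∀ (a : List Int) (b : List Int), Dom_solution a b → Pre_solution a b → Spec_solution a b (solution a b)

-- ===== LEMMAS AND PROOFS =====

-- the contiguous segment l[p:e] of the sorted list that A's mutated list equals after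
-- some pops at each end
def seg (l : List Int) (p e : ℕ) : List Int := (l.drop p).take (e - p)

theorem seg_all (l : List Int) : seg l 0 l.length = l := by simp [seg]

theorem seg_length (l : List Int) (p e : ℕ) (_h1 : p ≤ e) (h2 : e ≤ l.length) :
    (seg l p e).length = e - p := by
  simp [seg]; omega

theorem seg_cons (l : List Int) (p e : ℕ) (h1 : p < e) (h2 : e ≤ l.length) :
    seg l p e = l[p]'(by omega) :: seg l (p + 1) e := by
  unfold seg
  rw [List.drop_eq_getElem_cons (by omega)]
  have he : e - p = (e - (p + 1)) + 1 := by omega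
  rw [he, List.take_succ_cons]

theorem seg_concat (l : List Int) (p e : ℕ) (h1 : p < e) (h2 : e ≤ l.length) :
    seg l p e = seg l p (e - 1) ++ [l[e - 1]'(by omega)] := by
  unfold seg
  have he : e - p = (e - 1 - p) + 1 := by omega
  rw [he, List.take_add_one, List.getElem?_drop]
  have hpe : p + (e - 1 - p) = e - 1 := by omega
  rw [hpe, List.getElem?_eq_getElem (by omega)]
  rfl

theorem range_foldl_const_succ {σ : Type} (g : σ → σ) (init : σ) (n : ℕ) :
    (List.range (n + 1)).foldl (fun s _ => g s) init
      = (List.range n).foldl (fun s _ => g s) (g init) := by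
  rw [List.range_succ_eq_map]
  simp [List.foldl_map]

-- A's loop state after i back-pops / j front-pops on a and i front-pops / j back-pops
-- on b is exactly a pair of segments of the sorted lists; from there the two loops take
-- the same branch and produce the same total.
theorem loop_eq_altLoop (sa sb : List Int) (hnm : sa.length ≤ sb.length) (r : ℕ) :
    ∀ (i j : ℕ) (total : Int), i + j + r = sa.length →
      ((List.range r).foldl (fun s _ => solutionStep s)
          (seg sa j (sa.length - i), seg sb i (sb.length - j), total)).2.2
        = solutionAltLoop sa sb sa.length sb.length r i j total := by
  induction r with
  | zero => intro i j total h; simp [solutionAltLoop]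
  | succ r ih =>
    intro i j total h
    have hn : i + j < sa.length := by omega
    have hm : i + j < sb.length := by omega
    -- both end decompositions of each segment
    have haC : seg sa j (sa.length - i)
        = sa[j]'(by omega) :: seg sa (j + 1) (sa.length - i) :=
      seg_cons sa j (sa.length - i) (by omega) (by omega)
    have haL : seg sa j (sa.length - i)
        = seg sa j (sa.length - i - 1) ++ [sa[sa.length - i - 1]'(by omega)] :=
      seg_concat sa j (sa.length - i) (by omega) (by omega)
    have hbC : seg sb i (sb.length - j)
        = sb[i]'(by omega) :: seg sb (i + 1) (sb.length - j) :=
      seg_cons sb i (sb.length - j) (by omega) (by omega)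
    have hbL : seg sb i (sb.length - j)
        = seg sb i (sb.length - j - 1) ++ [sb[sb.length - j - 1]'(by omega)] :=
      seg_concat sb i (sb.length - j) (by omega) (by omega)
    have hlena : (seg sa j (sa.length - i)).length = sa.length - i - j := by
      rw [seg_length sa j (sa.length - i) (by omega) (by omega)]
    have hlenb : (seg sb i (sb.length - j)).length = sb.length - i - j := by
      rw [seg_length sb i (sb.length - j) (by omega) (by omega)]; omega
    -- the four lookups of A's step
    have hga0 : PySem.List.pyGet? (seg sa j (sa.length - i)) 0 = some (sa[j]'(by omega)) := by
      rw [haC]; simp [PySem.List.pyGet?, PySem.List.pyIdx?]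
    have hgb0 : PySem.List.pyGet? (seg sb i (sb.length - j)) 0 = some (sb[i]'(by omega)) := by
      rw [hbC]; simp [PySem.List.pyGet?, PySem.List.pyIdx?]
    have hgaL : PySem.List.pyGet? (seg sa j (sa.length - i))
        (((seg sa j (sa.length - i)).length : Int) - 1)
        = some (sa[sa.length - i - 1]'(by omega)) := by
      rw [hlena]
      have : ((sa.length - i - j : ℕ) : Int) - 1 = ((sa.length - i - j - 1 : ℕ) : ℕ) := by omega
      rw [this, PySem.List.pyGet?_natCast]
      rw [haL, List.getElem?_append_right (by rw [seg_length sa j (sa.length - i - 1) (by omega) (by omega)]; omega)]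
      rw [seg_length sa j (sa.length - i - 1) (by omega) (by omega)]
      have : sa.length - i - j - 1 - (sa.length - i - 1 - j) = 0 := by omega
      rw [this]
      rfl
    have hgbL : PySem.List.pyGet? (seg sb i (sb.length - j))
        (((seg sb i (sb.length - j)).length : Int) - 1)
        = some (sb[sb.length - j - 1]'(by omega)) := by
      rw [hlenb]
      have : ((sb.length - i - j : ℕ) : Int) - 1 = ((sb.length - i - j - 1 : ℕ) : ℕ) := by omega
      rw [this, PySem.List.pyGet?_natCast]
      rw [hbL, List.getElem?_append_right (by rw [seg_length sb i (sb.length - j - 1) (by omega) (by omega)]; omega)]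
      rw [seg_length sb i (sb.length - j - 1) (by omega) (by omega)]
      have : sb.length - i - j - 1 - (sb.length - j - 1 - i) = 0 := by omega
      rw [this]
      rfl
    -- the four pops of A's step
    have hpa1 : PySem.List.pop? (seg sa j (sa.length - i)) (-1)
        = some (sa[sa.length - i - 1]'(by omega), seg sa j (sa.length - i - 1)) := by
      rw [haL]; exact PySem.List.pop?_last _ _
    have hpa0 : PySem.List.pop? (seg sa j (sa.length - i)) 0
        = some (sa[j]'(by omega), seg sa (j + 1) (sa.length - i)) := by
      rw [haC]; exact PySem.List.pop?_zero_cons _ _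
    have hpb1 : PySem.List.pop? (seg sb i (sb.length - j)) (-1)
        = some (sb[sb.length - j - 1]'(by omega), seg sb i (sb.length - j - 1)) := by
      rw [hbL]; exact PySem.List.pop?_last _ _
    have hpb0 : PySem.List.pop? (seg sb i (sb.length - j)) 0
        = some (sb[i]'(by omega), seg sb (i + 1) (sb.length - j)) := by
      rw [hbC]; exact PySem.List.pop?_zero_cons _ _
    -- B's lookups agree with A's
    have hBa0 : PySem.List.pyGet? sa (j : Int) = some (sa[j]'(by omega)) := by
      rw [PySem.List.pyGet?_natCast]
      exact List.getElem?_eq_getElem (by omega)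
    have hBb0 : PySem.List.pyGet? sb (i : Int) = some (sb[i]'(by omega)) := by
      rw [PySem.List.pyGet?_natCast]
      exact List.getElem?_eq_getElem (by omega)
    have hBaL : PySem.List.pyGet? sa ((sa.length : Int) - 1 - (i : Int))
        = some (sa[sa.length - i - 1]'(by omega)) := by
      have : ((sa.length : Int) - 1 - (i : Int)) = ((sa.length - i - 1 : ℕ) : ℕ) := by omega
      rw [this, PySem.List.pyGet?_natCast]
      exact List.getElem?_eq_getElem (by omega)
    have hBbL : PySem.List.pyGet? sb ((sb.length : Int) - 1 - (j : Int))
        = some (sb[sb.length - j - 1]'(by omega)) := by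
      have : ((sb.length : Int) - 1 - (j : Int)) = ((sb.length - j - 1 : ℕ) : ℕ) := by omega
      rw [this, PySem.List.pyGet?_natCast]
      exact List.getElem?_eq_getElem (by omega)
    rw [range_foldl_const_succ]
    show ((List.range r).foldl (fun s _ => solutionStep s)
        (solutionStep (seg sa j (sa.length - i), seg sb i (sb.length - j), total))).2.2 = _
    rw [solutionStep, solutionAltLoop]
    simp only [hga0, hgb0, hgaL, hgbL, hpa0, hpa1, hpb0, hpb1, hBa0, hBb0, hBaL, hBbL,
      Option.getD_some, if_pos hn]
    split
    · -- take ba: a loses its last, b its first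
      simp only [Nat.sub_sub]
      exact ih (i + 1) j _ (by omega)
    · -- take ab: a loses its first, b its last
      simp only [Nat.sub_sub]
      exact ih i (j + 1) _ (by omega)

-- ===== VERDICT (by name: the statement is the Claim_ definition above) =====
theorem solution_spec : Claim_equal_solution := by
  intro a b _ hpre
  unfold Spec_solution solution solution_alt
  have hnm : (PySem.List.sorted a (fun x => x) false).length
      ≤ (PySem.List.sorted b (fun x => x) false).length := by
    rw [PySem.List.length_sorted, PySem.List.length_sorted]; exact hpre
  have := loop_eq_altLoop (PySem.List.sorted a (fun x => x) false)
    (PySem.List.sorted b (fun x => x) false) hnm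
    (PySem.List.sorted a (fun x => x) false).length 0 0 0 (by omega)
  simp only [Nat.sub_zero] at this
  rw [seg_all, seg_all] at this
  exact this
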